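-- pv_equiv track=rewrite | github.com/savourylie/leetcode | deck_revealed_increasing.py | _scamble_index
-- ===== SOURCE A (Python) =====
-- def _scamble_index(index):
--     index = index[:]
--     counter = 0
--     result_list = []
--
--     while index:
--         element = index.pop(0)
--         if counter % 2 == 0:
--             result_list.append(element)
--         else:
--             index.append(element)
--
--         counter += 1
--
--     return result_list
-- ===== SOURCE B (Python) =====
-- def _scamble_index(index):
--     result = []
--     queue = index
--     c = 0
--     while queue:
--         taken = [x for i, x in enumerate(queue) if (c + i) % 2 == 0]
--         nxt = [x for i, x in enumerate(queue) if (c + i) % 2 == 1]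
--         result += taken
--         c += len(queue)
--         queue = nxt
--     return result
-- ===== Notes on version B (the rewrite author's own statement) =====
-- stated objective: faster
-- what changed: B processes the queue in whole rounds with a carried parity counter, splitting each round into taken/carried sublists via list comprehensions, instead of A's one-element-at-a-time pop(0)/append rotation of a mutable copy.
import Mathlib
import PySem

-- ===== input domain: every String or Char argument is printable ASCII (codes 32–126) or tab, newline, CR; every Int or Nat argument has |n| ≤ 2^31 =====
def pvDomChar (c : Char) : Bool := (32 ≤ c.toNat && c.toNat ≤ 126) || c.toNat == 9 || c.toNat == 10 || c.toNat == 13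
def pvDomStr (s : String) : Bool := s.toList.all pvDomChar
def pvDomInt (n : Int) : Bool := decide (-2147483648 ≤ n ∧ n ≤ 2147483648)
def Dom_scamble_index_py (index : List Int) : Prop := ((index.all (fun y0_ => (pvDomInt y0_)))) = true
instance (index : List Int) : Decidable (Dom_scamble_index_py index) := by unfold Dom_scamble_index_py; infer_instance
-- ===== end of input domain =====

-- B replaces A's element-at-a-time pop/rotate loop by round-batched processing with a
-- carried parity counter (objective: alternative decomposition; return values proved equal).

-- ===== PORT A =====
-- A's while loop: state (index, counter, result_list); pop(0), even counter reveals,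
-- odd counter re-appends to the back. Terminates since 2*len + counter%2 decreases.
def pvLoopA (q : List Int) (c : Nat) (res : List Int) : List Int :=
  match q with
  | [] => res
  | x :: rest =>
      if c % 2 == 0 then pvLoopA rest (c + 1) (res ++ [x])
      else pvLoopA (rest ++ [x]) (c + 1) res
termination_by 2 * q.length + c % 2
decreasing_by
  · simp; omega
  · simp_all; omega

def scamble_index_py (index : List Int) : List Int := pvLoopA index 0 []

-- ===== PORT B =====
-- elements of one round revealed (i.e. (c+i) % 2 == 0, i the position in the round)
def pvTakeR (q : List Int) (c : Nat) : List Int :=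
  match q with
  | [] => []
  | x :: rest => if (c % 2 == 0) then x :: pvTakeR rest (c + 1) else pvTakeR rest (c + 1)

-- elements of one round carried to the next round
def pvCarryR (q : List Int) (c : Nat) : List Int :=
  match q with
  | [] => []
  | x :: rest => if (c % 2 == 0) then pvCarryR rest (c + 1) else x :: pvCarryR rest (c + 1)

-- length of the carried part: (n + c%2)/2 carried out of n
theorem pvCarryR_length (q : List Int) (c : Nat) :
    (pvCarryR q c).length = (q.length + c % 2) / 2 := by
  induction q generalizing c with
  | nil => simp [pvCarryR]
  | cons x rest ih =>
    rcases Nat.mod_two_eq_zero_or_one c with hc | hc <;>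
      simp [pvCarryR, hc, ih (c + 1)] <;> omega

-- the carried part shrinks the measure 2*len + parity (termination of B's outer while loop)
theorem pvCarryR_measure (q : List Int) (c : Nat) (h : q ≠ []) :
    2 * (pvCarryR q c).length + (c + q.length) % 2 < 2 * q.length + c % 2 := by
  have hl := pvCarryR_length q c
  have hp : 0 < q.length := List.length_pos_iff.mpr h
  omega

-- B's outer while loop over rounds
def pvLoopB (q : List Int) (c : Nat) (res : List Int) : List Int :=
  match q with
  | [] => res
  | x :: rest =>
      pvLoopB (pvCarryR (x :: rest) c) (c + (x :: rest).length) (res ++ pvTakeR (x :: rest) c)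
termination_by 2 * q.length + c % 2
decreasing_by exact pvCarryR_measure _ _ (by simp)

def scamble_index_py_alt (index : List Int) : List Int := pvLoopB index 0 []

-- ===== PRECONDITION & SPEC =====
def Spec_scamble_index_py (index : List Int) (out : List Int) : Prop := out = scamble_index_py_alt index
instance (index : List Int) (out : List Int) : Decidable (Spec_scamble_index_py index out) := by unfold Spec_scamble_index_py; infer_instance

-- ===== CLAIM (what is proved, stated in full; the proofs are below) =====
def Claim_equal_scamble_index_py : Prop := ∀ (index : List Int), Dom_scamble_index_py index → Spec_scamble_index_py index (scamble_index_py index)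

-- ===== LEMMAS AND PROOFS =====

-- A's loop, run across one whole round q (with arbitrary trailing queue t), reveals
-- exactly pvTakeR q c and leaves t followed by pvCarryR q c in the queue.
theorem pvLoopA_round (q : List Int) (t : List Int) (c : Nat) (res : List Int) :
    pvLoopA (q ++ t) c res
      = pvLoopA (t ++ pvCarryR q c) (c + q.length) (res ++ pvTakeR q c) := by
  induction q generalizing t c res with
  | nil => simp [pvCarryR, pvTakeR]
  | cons x rest ih =>
    rcases Nat.even_or_odd c with hc | hc
    · have hc' := Nat.even_iff.mp hc
      show pvLoopA (x :: (rest ++ t)) c res = _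
      rw [pvLoopA]
      simp only [hc']
      rw [if_pos (by simp)]
      rw [ih t (c + 1) (res ++ [x])]
      have hlen : c + (x :: rest).length = c + 1 + rest.length := by
        simp [List.length_cons]; omega
      rw [hlen]
      simp [pvCarryR, pvTakeR, hc']
    · have hc' := Nat.odd_iff.mp hc
      show pvLoopA (x :: (rest ++ t)) c res = _
      rw [pvLoopA]
      simp only [hc']
      rw [if_neg (by simp)]
      have : rest ++ t ++ [x] = rest ++ (t ++ [x]) := by simp
      rw [this, ih (t ++ [x]) (c + 1) res]
      have hlen : c + (x :: rest).length = c + 1 + rest.length := by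
        simp [List.length_cons]; omega
      rw [hlen]
      simp [pvCarryR, pvTakeR, hc']

theorem pvLoop_eq (q : List Int) (c : Nat) (res : List Int) :
    pvLoopA q c res = pvLoopB q c res := by
  match q with
  | [] => simp [pvLoopA, pvLoopB]
  | x :: rest =>
    have h := pvLoopA_round (x :: rest) [] c res
    simp only [List.append_nil, List.nil_append] at h
    rw [h, pvLoop_eq (pvCarryR (x :: rest) c) (c + (x :: rest).length) (res ++ pvTakeR (x :: rest) c)]
    rw [pvLoopB]
termination_by 2 * q.length + c % 2
decreasing_by exact pvCarryR_measure _ _ (by simp)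

-- ===== VERDICT (by name: the statement is the Claim_ definition above) =====
theorem scamble_index_py_spec : Claim_equal_scamble_index_py := by
  intro index _
  unfold Spec_scamble_index_py scamble_index_py scamble_index_py_alt
  exact pvLoop_eq index 0 []
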